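-- pv_equiv track=rewrite | github.com/AshwinDeshpande96/Measuring_the_Impact_of_Verbal_Disfluency_Tags_on_Automated_Dementia_Detection | code/disfluency/get_accuracy.py | get_all_errors
-- ===== SOURCE A (Python) =====
-- def get_all_errors(target):
--     if '[//]' not in target and '[/]' not in target:
--         return None
--     word_repeat_errors = []
--     phrase_repeat_errors = []
--     word_retrace_errors = []
--     phrase_retrace_errors = []
--     repeats = [index for index, element in enumerate(target) if element == '[/]']
--     retraces = [index for index, element in enumerate(target) if element == '[//]']
--     for rep_i in repeats:
--         if rep_i < 2:
--             continue
--         if ">" in target[rep_i - 1]: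
--             error_i = [rep_i - 1]
--             idx = rep_i - 1
--             while idx > 0:
--                 t = target[idx]
--                 if idx not in error_i:
--                     error_i = [idx] + error_i
--                 if "<" in t:
--                     break
--                 idx -= 1
--             phrase_repeat_errors.append(error_i)
--         else:
--             error_i = [rep_i - 1]
--             word_repeat_errors.append(error_i)
--             phrase_repeat_errors.append(error_i)
--     for ret_i in retraces:
--         if ret_i < 2:
--             continue
--         if ">" in target[ret_i - 1]:
--             error_i = [ret_i - 1]
--             idx = ret_i - 1
--             while idx > 0:
--                 t = target[idx]
--                 if idx not in error_i:
--                     error_i = [idx] + error_i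
--                 if "<" in t:
--                     break
--                 idx -= 1
--             phrase_retrace_errors.append(error_i)
--         else:
--             error_i = [ret_i - 1]
--             word_retrace_errors.append(error_i)
--             phrase_retrace_errors.append(error_i)
--     if not word_repeat_errors and not phrase_repeat_errors and not word_retrace_errors and not phrase_retrace_errors:
--         return None
--     return word_repeat_errors, phrase_repeat_errors, word_retrace_errors, phrase_retrace_errors
-- ===== SOURCE B (Python) =====
-- # Alternative single forward pass: maintain the last '<'-token index (default 1) and the previous
-- # token, emit each span at its marker, instead of A's two index-comprehensions plus a
-- # backward while-scan per marker.
-- def get_all_errors(target):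
--     word_repeat, phrase_repeat, word_retrace, phrase_retrace = [], [], [], []
--     last_open = 1
--     prev = ''
--     for i, tok in enumerate(target):
--         if i >= 2 and tok in ('[/]', '[//]'):
--             if '>' in prev:
--                 span = list(range(last_open, i))
--                 (phrase_repeat if tok == '[/]' else phrase_retrace).append(span)
--             else:
--                 span = [i - 1]
--                 if tok == '[/]':
--                     word_repeat.append(span)
--                     phrase_repeat.append(span)
--                 else:
--                     word_retrace.append(span)
--                     phrase_retrace.append(span)
--         if i >= 1 and '<' in tok:
--             last_open = i
--         prev = tok
--     if not (word_repeat or phrase_repeat or word_retrace or phrase_retrace):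
--         return None
--     return word_repeat, phrase_repeat, word_retrace, phrase_retrace
-- ===== Notes on version B (the rewrite author's own statement) =====
-- stated objective: alternative
-- what changed: B replaces A's two index-comprehension passes plus a backward while-rescan per marker by one forward pass that maintains the last '<'-token index and the previous token, emitting each span at its marker with a range() call.
import Mathlib
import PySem

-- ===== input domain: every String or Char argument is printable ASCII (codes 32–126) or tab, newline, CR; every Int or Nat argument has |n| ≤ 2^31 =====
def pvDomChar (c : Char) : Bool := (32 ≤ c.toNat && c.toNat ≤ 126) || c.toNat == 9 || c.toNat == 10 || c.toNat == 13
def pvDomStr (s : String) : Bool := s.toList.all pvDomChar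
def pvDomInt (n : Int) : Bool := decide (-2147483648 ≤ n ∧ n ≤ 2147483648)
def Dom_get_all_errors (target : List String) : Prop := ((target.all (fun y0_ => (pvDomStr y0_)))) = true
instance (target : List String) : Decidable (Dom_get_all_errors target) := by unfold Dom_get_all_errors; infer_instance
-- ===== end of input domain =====

-- B replaces A's two index-comprehension passes plus a backward rescan per marker by one
-- forward pass maintaining the last '<'-token index and the previous token (objective: alternative).

-- ===== PORT A =====
def pvHasLt (s : String) : Bool := PySem.Str.isIn "<" s
def pvHasGt (s : String) : Bool := PySem.Str.isIn ">" s

-- 'if idx not in error_i: error_i = [idx] + error_i'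
def pvPrepend (i : Int) (acc : List Int) : List Int := if i ∈ acc then acc else i :: acc

-- A's inner while loop ('while idx > 0: …'), structural recursion on idx (a Nat, since idx ≥ 0);
-- the prepend happens before the '<' break test, exactly as in A
def pvAWhile (target : List String) : Nat → List Int → List Int
  | 0, acc => acc
  | j+1, acc =>
      if pvHasLt (PySem.List.pyGetD target ((j+1 : Nat) : Int) "") then pvPrepend ((j+1 : Nat) : Int) acc
      else pvAWhile target j (pvPrepend ((j+1 : Nat) : Int) acc)

-- the body of A's two (textually identical) for-loops, state = (word list, phrase list)
def pvAStep (target : List String) (st : List (List Int) × List (List Int)) (i : Int) :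
    List (List Int) × List (List Int) :=
  if i < 2 then st
  else if pvHasGt (PySem.List.pyGetD target (i - 1) "") then
    (st.1, st.2 ++ [pvAWhile target (i - 1).toNat [i - 1]])
  else
    (st.1 ++ [[i - 1]], st.2 ++ [[i - 1]])

def get_all_errors (target : List String) : Option (List (List Int) × List (List Int) × List (List Int) × List (List Int)) :=
  if "[//]" ∉ target ∧ "[/]" ∉ target then none
  else
    let repeats := (PySem.List.enumerate target 0).filterMap (fun p => if p.2 = "[/]" then some p.1 else none)
    let retraces := (PySem.List.enumerate target 0).filterMap (fun p => if p.2 = "[//]" then some p.1 else none)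
    let rp := repeats.foldl (pvAStep target) ([], [])
    let rt := retraces.foldl (pvAStep target) ([], [])
    if rp.1 = [] ∧ rp.2 = [] ∧ rt.1 = [] ∧ rt.2 = [] then none
    else some (rp.1, rp.2, rt.1, rt.2)

-- ===== PORT B =====
-- loop state: (last_open, prev, word_repeat, phrase_repeat, word_retrace, phrase_retrace)
def pvBStep
    (st : Int × String × List (List Int) × List (List Int) × List (List Int) × List (List Int))
    (p : Int × String) :
    Int × String × List (List Int) × List (List Int) × List (List Int) × List (List Int) :=
  let lo := st.1
  let prev := st.2.1
  let wr := st.2.2.1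
  let pr := st.2.2.2.1
  let wt := st.2.2.2.2.1
  let pt := st.2.2.2.2.2
  let i := p.1
  let tok := p.2
  let lists :=
    if 2 ≤ i ∧ (tok = "[/]" ∨ tok = "[//]") then
      if pvHasGt prev then
        let span := PySem.List.pyRange lo i 1
        if tok = "[/]" then (wr, pr ++ [span], wt, pt) else (wr, pr, wt, pt ++ [span])
      else
        let span := [i - 1]
        if tok = "[/]" then (wr ++ [span], pr ++ [span], wt, pt)
        else (wr, pr, wt ++ [span], pt ++ [span])
    else (wr, pr, wt, pt)
  let lo' := if 1 ≤ i ∧ pvHasLt tok then i else lo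
  (lo', tok, lists)

def get_all_errors_alt (target : List String) : Option (List (List Int) × List (List Int) × List (List Int) × List (List Int)) :=
  let st := (PySem.List.enumerate target 0).foldl pvBStep (1, "", [], [], [], [])
  let wr := st.2.2.1
  let pr := st.2.2.2.1
  let wt := st.2.2.2.2.1
  let pt := st.2.2.2.2.2
  if wr = [] ∧ pr = [] ∧ wt = [] ∧ pt = [] then none else some (wr, pr, wt, pt)

-- ===== PRECONDITION & SPEC =====
def Spec_get_all_errors (target : List String) (out : Option (List (List Int) × List (List Int) × List (List Int) × List (List Int))) : Prop := out = get_all_errors_alt target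
instance (target : List String) (out : Option (List (List Int) × List (List Int) × List (List Int) × List (List Int))) : Decidable (Spec_get_all_errors target out) := by unfold Spec_get_all_errors; infer_instance

-- ===== CLAIM (what is proved, stated in full; the proofs are below) =====
def Claim_equal_get_all_errors : Prop := ∀ (target : List String), Dom_get_all_errors target → Spec_get_all_errors target (get_all_errors target)

-- ===== LEMMAS AND PROOFS =====

-- last index j' ∈ [1, j] whose token contains '<', defaulting to 1
def pvG (target : List String) : Nat → Nat
  | 0 => 1
  | j+1 => if pvHasLt (PySem.List.pyGetD target ((j+1 : Nat) : Int) "") then j+1 else pvG target j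

-- the span both programs emit for a marker at index s (s ≥ 2)
def pvSpan (target : List String) (s : Nat) : List Int :=
  if pvHasGt (PySem.List.pyGetD target ((s : Int) - 1) "") then
    PySem.List.pyRange ((pvG target (s-1) : Nat) : Int) (s : Int) 1
  else [(s : Int) - 1]

-- phrase spans of markers 'c' in the suffix xs starting at index s
def pvP (target : List String) (c : String) : List String → Nat → List (List Int)
  | [], _ => []
  | tok :: xs, s => (if tok = c ∧ 2 ≤ s then [pvSpan target s] else []) ++ pvP target c xs (s+1)

-- word spans of markers 'c' in the suffix xs starting at index s
def pvW (target : List String) (c : String) : List String → Nat → List (List Int)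
  | [], _ => []
  | tok :: xs, s =>
      (if tok = c ∧ 2 ≤ s ∧ ¬ pvHasGt (PySem.List.pyGetD target ((s : Int) - 1) "") then
        [[(s : Int) - 1]] else []) ++ pvW target c xs (s+1)

theorem pvPrepend_range (j m : Nat) (h : j + 1 < m) :
    pvPrepend ((j+1 : Nat) : Int) (PySem.List.pyRange ((j+1+1 : Nat) : Int) (m : Int) 1)
      = PySem.List.pyRange ((j+1 : Nat) : Int) (m : Int) 1 := by
  unfold pvPrepend
  rw [if_neg (by simp only [PySem.List.mem_pyRange_one]; push_cast; omega)]
  rw [show ((j+1+1 : Nat) : Int) = ((j+1 : Nat) : Int) + 1 by push_cast; ring]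
  rw [← PySem.List.pyRange_one_cons (by push_cast; omega)]

theorem pvPrepend_range_self (j m : Nat) (h : j < m) :
    pvPrepend ((j : Nat) : Int) (PySem.List.pyRange ((j : Nat) : Int) (m : Int) 1)
      = PySem.List.pyRange ((j : Nat) : Int) (m : Int) 1 := by
  unfold pvPrepend
  rw [if_pos (by simp only [PySem.List.mem_pyRange_one]; omega)]

theorem pvAWhile_range (target : List String) : ∀ (j m : Nat), 1 ≤ j → j < m →
    pvAWhile target j (PySem.List.pyRange ((j+1 : Nat) : Int) (m : Int) 1)
      = PySem.List.pyRange ((pvG target j : Nat) : Int) (m : Int) 1 := by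
  intro j
  induction j with
  | zero => intro m h1 _; omega
  | succ j' ih =>
    intro m _ hm
    rw [pvAWhile, pvPrepend_range j' m (by omega)]
    by_cases hlt : pvHasLt (PySem.List.pyGetD target ((j'+1 : Nat) : Int) "") = true
    · rw [if_pos hlt]
      have hg : pvG target (j'+1) = j'+1 := by rw [pvG, if_pos hlt]
      rw [hg]
    · rw [if_neg hlt]
      have hg : pvG target (j'+1) = pvG target j' := by rw [pvG, if_neg hlt]
      rw [hg]
      by_cases hj : j' = 0
      · subst hj; simp [pvAWhile, pvG]
      · exact ih m (by omega) (by omega)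

theorem pvAWhile_self (target : List String) (j m : Nat) (h1 : 1 ≤ j) (hm : j < m) :
    pvAWhile target j (PySem.List.pyRange ((j : Nat) : Int) (m : Int) 1)
      = PySem.List.pyRange ((pvG target j : Nat) : Int) (m : Int) 1 := by
  obtain ⟨j', rfl⟩ : ∃ j', j = j' + 1 := ⟨j - 1, by omega⟩
  rw [pvAWhile, pvPrepend_range_self (j'+1) m hm]
  by_cases hlt : pvHasLt (PySem.List.pyGetD target ((j'+1 : Nat) : Int) "") = true
  · rw [if_pos hlt]
    have hg : pvG target (j'+1) = j'+1 := by rw [pvG, if_pos hlt]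
    rw [hg]
  · rw [if_neg hlt]
    have hg : pvG target (j'+1) = pvG target j' := by rw [pvG, if_neg hlt]
    rw [hg]
    by_cases hj : j' = 0
    · subst hj; simp [pvAWhile, pvG]
    · exact pvAWhile_range target j' m (by omega) (by omega)

theorem pvAWhile_entry (target : List String) (s : Nat) (h2 : 2 ≤ s) :
    pvAWhile target (s-1) [((s : Nat) : Int) - 1]
      = PySem.List.pyRange ((pvG target (s-1) : Nat) : Int) (s : Int) 1 := by
  have hsing : [((s : Nat) : Int) - 1] = PySem.List.pyRange (((s-1 : Nat)) : Int) ((s : Nat) : Int) 1 := by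
    have : ((s : Nat) : Int) = (((s-1 : Nat)) : Int) + 1 := by push_cast [Nat.cast_sub (by omega : 1 ≤ s)]; ring
    rw [this, PySem.List.pyRange_one_singleton]
    push_cast [Nat.cast_sub (by omega : 1 ≤ s)]; ring_nf
  rw [hsing]
  exact pvAWhile_self target (s-1) s (by omega) (by omega)

theorem pvSpan_eq_while (target : List String) (s : Nat) (h2 : 2 ≤ s)
    (hgt : pvHasGt (PySem.List.pyGetD target (((s : Nat) : Int) - 1) "") = true) :
    pvAWhile target (((s : Nat) : Int) - 1).toNat [((s : Nat) : Int) - 1] = pvSpan target s := by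
  have ht : (((s : Nat) : Int) - 1).toNat = s - 1 := by omega
  rw [ht, pvAWhile_entry target s h2, pvSpan, if_pos hgt]

theorem pvA_fold (target : List String) (c : String) :
    ∀ (xs : List String) (s : Nat) (wr0 pr0 : List (List Int)), target.drop s = xs →
    (((PySem.List.enumerate xs (s : Int)).filterMap
        (fun p => if p.2 = c then some p.1 else none)).foldl (pvAStep target) (wr0, pr0))
      = (wr0 ++ pvW target c xs s, pr0 ++ pvP target c xs s) := by
  intro xs
  induction xs with
  | nil => intro s wr0 pr0 _; simp [PySem.List.enumerate_nil, pvW, pvP]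
  | cons tok xs ih =>
    intro s wr0 pr0 hdrop
    have hdrop' : target.drop (s+1) = xs := by
      have := congrArg (List.drop 1) hdrop
      simpa [List.drop_drop] using this
    have hcast : ((s : Int) + 1) = ((s+1 : Nat) : Int) := by push_cast; ring
    rw [PySem.List.enumerate_cons, hcast]
    by_cases hc : tok = c
    · subst hc
      rw [List.filterMap_cons]
      rw [if_pos rfl]
      -- foldl over (↑s :: rest)
      rw [List.foldl_cons]
      by_cases hs : s < 2
      · have hstep : pvAStep target (wr0, pr0) ((s : Nat) : Int) = (wr0, pr0) := by
          rw [pvAStep, if_pos (by exact_mod_cast hs)]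
        rw [hstep, ih (s+1) wr0 pr0 hdrop']
        have hW : pvW target tok (tok :: xs) s = pvW target tok xs (s+1) := by
          rw [pvW, if_neg (by omega), List.nil_append]
        have hP : pvP target tok (tok :: xs) s = pvP target tok xs (s+1) := by
          rw [pvP, if_neg (by omega), List.nil_append]
        rw [hW, hP]
      · have h2 : 2 ≤ s := by omega
        by_cases hgt : pvHasGt (PySem.List.pyGetD target (((s : Nat) : Int) - 1) "") = true
        · have hstep : pvAStep target (wr0, pr0) ((s : Nat) : Int)
              = (wr0, pr0 ++ [pvSpan target s]) := by
            rw [pvAStep, if_neg (by simp; omega), if_pos hgt]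
            rw [pvSpan_eq_while target s h2 hgt]
          rw [hstep, ih (s+1) _ _ hdrop']
          have hW : pvW target tok (tok :: xs) s = pvW target tok xs (s+1) := by
            rw [pvW, if_neg (by simp [hgt, h2]), List.nil_append]
          have hP : pvP target tok (tok :: xs) s = [pvSpan target s] ++ pvP target tok xs (s+1) := by
            rw [pvP, if_pos ⟨rfl, h2⟩]
          rw [hW, hP]
          simp [List.append_assoc]
        · have hstep : pvAStep target (wr0, pr0) ((s : Nat) : Int)
              = (wr0 ++ [[((s : Nat) : Int) - 1]], pr0 ++ [[((s : Nat) : Int) - 1]]) := by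
            rw [pvAStep, if_neg (by simp; omega), if_neg hgt]
          have hspan : pvSpan target s = [((s : Nat) : Int) - 1] := by
            rw [pvSpan, if_neg hgt]
          rw [hstep, ih (s+1) _ _ hdrop']
          have hW : pvW target tok (tok :: xs) s
              = [[((s : Nat) : Int) - 1]] ++ pvW target tok xs (s+1) := by
            rw [pvW, if_pos ⟨rfl, h2, hgt⟩]
          have hP : pvP target tok (tok :: xs) s = [pvSpan target s] ++ pvP target tok xs (s+1) := by
            rw [pvP, if_pos ⟨rfl, h2⟩]
          rw [hW, hP, hspan]
          simp [List.append_assoc]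
    · rw [List.filterMap_cons]
      simp only [hc, if_false]
      rw [ih (s+1) wr0 pr0 hdrop']
      have hW : pvW target c (tok :: xs) s = pvW target c xs (s+1) := by
        rw [pvW, if_neg (by simp [hc]), List.nil_append]
      have hP : pvP target c (tok :: xs) s = pvP target c xs (s+1) := by
        rw [pvP, if_neg (by simp [hc]), List.nil_append]
      rw [hW, hP]

theorem pvB_fold (target : List String) :
    ∀ (xs : List String) (s : Nat)
      (lo : Int) (prev : String) (wr0 pr0 wt0 pt0 : List (List Int)),
      target.drop s = xs →
      lo = ((pvG target (s-1) : Nat) : Int) →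
      (1 ≤ s → prev = PySem.List.pyGetD target ((s : Int) - 1) "") →
    ∃ lo' prev',
      (PySem.List.enumerate xs (s : Int)).foldl pvBStep (lo, prev, wr0, pr0, wt0, pt0)
        = (lo', prev',
            wr0 ++ pvW target "[/]" xs s, pr0 ++ pvP target "[/]" xs s,
            wt0 ++ pvW target "[//]" xs s, pt0 ++ pvP target "[//]" xs s) := by
  intro xs
  induction xs with
  | nil =>
    intro s lo prev wr0 pr0 wt0 pt0 _ _ _
    exact ⟨lo, prev, by simp [PySem.List.enumerate_nil, pvW, pvP]⟩
  | cons tok xs ih =>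
    intro s lo prev wr0 pr0 wt0 pt0 hdrop hlo hprev
    have hdrop' : target.drop (s+1) = xs := by
      have := congrArg (List.drop 1) hdrop
      simpa [List.drop_drop] using this
    have htok : PySem.List.pyGetD target ((s : Nat) : Int) "" = tok := by
      have h0 : target[s]? = some tok := by
        have := congrArg (fun l => l[0]?) hdrop
        simpa [List.getElem?_drop] using this
      simp [PySem.List.pyGetD_natCast, List.getD_eq_getElem?_getD, h0]
    have hcast : ((s : Int) + 1) = ((s+1 : Nat) : Int) := by push_cast; ring
    have hlo' : (if 1 ≤ (s : Int) ∧ pvHasLt tok = true then (s : Int) else lo)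
        = ((pvG target ((s+1)-1) : Nat) : Int) := by
      match s, hlo with
      | 0, hlo => simpa using hlo
      | s''+1, hlo =>
        simp only [Nat.add_sub_cancel]
        by_cases hl : pvHasLt tok = true
        · rw [if_pos ⟨by push_cast; omega, hl⟩, pvG, htok, if_pos hl]
        · rw [if_neg (by tauto), pvG, htok, if_neg hl, hlo]
          simp
    have hprev' : (1 ≤ s+1) → tok = PySem.List.pyGetD target (((s+1 : Nat) : Int) - 1) "" := by
      intro _
      rw [show (((s+1 : Nat) : Int) - 1) = ((s : Nat) : Int) by push_cast; ring, htok]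
    rw [PySem.List.enumerate_cons, hcast, List.foldl_cons]
    by_cases hmark : (2 ≤ (s : Int) ∧ (tok = "[/]" ∨ tok = "[//]"))
    · have h2 : 2 ≤ s := by exact_mod_cast hmark.1
      have hprev2 : prev = PySem.List.pyGetD target ((s : Int) - 1) "" := hprev (by omega)
      by_cases hgt : pvHasGt (PySem.List.pyGetD target (((s : Nat) : Int) - 1) "") = true
      · have hspan : pvSpan target s = PySem.List.pyRange lo ((s : Nat) : Int) 1 := by
          rw [pvSpan, if_pos hgt, hlo]
        rcases hmark.2 with htk | htk
        · -- a repeat marker with '>' before it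
          have hstep : pvBStep (lo, prev, wr0, pr0, wt0, pt0) (((s : Nat) : Int), tok)
              = ((if 1 ≤ (s : Int) ∧ pvHasLt tok = true then (s : Int) else lo), tok,
                  wr0, pr0 ++ [pvSpan target s], wt0, pt0) := by
            simp only [pvBStep, hspan]
            rw [if_pos hmark, if_pos (show pvHasGt prev = true by rw [hprev2]; exact hgt), if_pos htk]
          rw [hstep, hlo']
          obtain ⟨lo', prev', hrec⟩ := ih (s+1) _ tok wr0 (pr0 ++ [pvSpan target s]) wt0 pt0 hdrop' rfl hprev'
          refine ⟨lo', prev', ?_⟩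
          rw [hrec]
          have hW1 : pvW target "[/]" (tok :: xs) s = pvW target "[/]" xs (s+1) := by
            rw [pvW, if_neg (by simp [hgt]), List.nil_append]
          have hP1 : pvP target "[/]" (tok :: xs) s = [pvSpan target s] ++ pvP target "[/]" xs (s+1) := by
            rw [pvP, if_pos ⟨htk, h2⟩]
          have hW2 : pvW target "[//]" (tok :: xs) s = pvW target "[//]" xs (s+1) := by
            rw [pvW, if_neg (by simp [htk]), List.nil_append]
          have hP2 : pvP target "[//]" (tok :: xs) s = pvP target "[//]" xs (s+1) := by
            rw [pvP, if_neg (by simp [htk]), List.nil_append]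
          rw [hW1, hP1, hW2, hP2]
          simp [List.append_assoc]
        · -- a retrace marker with '>' before it
          have hne : tok ≠ "[/]" := by rw [htk]; decide
          have hstep : pvBStep (lo, prev, wr0, pr0, wt0, pt0) (((s : Nat) : Int), tok)
              = ((if 1 ≤ (s : Int) ∧ pvHasLt tok = true then (s : Int) else lo), tok,
                  wr0, pr0, wt0, pt0 ++ [pvSpan target s]) := by
            simp only [pvBStep, hspan]
            rw [if_pos hmark, if_pos (show pvHasGt prev = true by rw [hprev2]; exact hgt), if_neg hne]
          rw [hstep, hlo']
          obtain ⟨lo', prev', hrec⟩ := ih (s+1) _ tok wr0 pr0 wt0 (pt0 ++ [pvSpan target s]) hdrop' rfl hprev'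
          refine ⟨lo', prev', ?_⟩
          rw [hrec]
          have hW1 : pvW target "[/]" (tok :: xs) s = pvW target "[/]" xs (s+1) := by
            rw [pvW, if_neg (by simp [hne]), List.nil_append]
          have hP1 : pvP target "[/]" (tok :: xs) s = pvP target "[/]" xs (s+1) := by
            rw [pvP, if_neg (by simp [hne]), List.nil_append]
          have hW2 : pvW target "[//]" (tok :: xs) s = pvW target "[//]" xs (s+1) := by
            rw [pvW, if_neg (by simp [hgt]), List.nil_append]
          have hP2 : pvP target "[//]" (tok :: xs) s = [pvSpan target s] ++ pvP target "[//]" xs (s+1) := by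
            rw [pvP, if_pos ⟨htk, h2⟩]
          rw [hW1, hP1, hW2, hP2]
          simp [List.append_assoc]
      · have hspan : pvSpan target s = [((s : Nat) : Int) - 1] := by
          rw [pvSpan, if_neg hgt]
        rcases hmark.2 with htk | htk
        · -- a repeat word marker
          have hstep : pvBStep (lo, prev, wr0, pr0, wt0, pt0) (((s : Nat) : Int), tok)
              = ((if 1 ≤ (s : Int) ∧ pvHasLt tok = true then (s : Int) else lo), tok,
                  wr0 ++ [pvSpan target s], pr0 ++ [pvSpan target s], wt0, pt0) := by
            simp only [pvBStep, hspan]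
            rw [if_pos hmark, if_neg (show ¬ pvHasGt prev = true by rw [hprev2]; exact hgt), if_pos htk]
          rw [hstep, hlo']
          obtain ⟨lo', prev', hrec⟩ := ih (s+1) _ tok (wr0 ++ [pvSpan target s]) (pr0 ++ [pvSpan target s]) wt0 pt0 hdrop' rfl hprev'
          refine ⟨lo', prev', ?_⟩
          rw [hrec]
          have hW1 : pvW target "[/]" (tok :: xs) s = [pvSpan target s] ++ pvW target "[/]" xs (s+1) := by
            rw [pvW, if_pos ⟨htk, h2, hgt⟩, hspan]
          have hP1 : pvP target "[/]" (tok :: xs) s = [pvSpan target s] ++ pvP target "[/]" xs (s+1) := by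
            rw [pvP, if_pos ⟨htk, h2⟩]
          have hW2 : pvW target "[//]" (tok :: xs) s = pvW target "[//]" xs (s+1) := by
            rw [pvW, if_neg (by simp [htk]), List.nil_append]
          have hP2 : pvP target "[//]" (tok :: xs) s = pvP target "[//]" xs (s+1) := by
            rw [pvP, if_neg (by simp [htk]), List.nil_append]
          rw [hW1, hP1, hW2, hP2]
          simp [List.append_assoc]
        · -- a retrace word marker
          have hne : tok ≠ "[/]" := by rw [htk]; decide
          have hstep : pvBStep (lo, prev, wr0, pr0, wt0, pt0) (((s : Nat) : Int), tok)
              = ((if 1 ≤ (s : Int) ∧ pvHasLt tok = true then (s : Int) else lo), tok,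
                  wr0, pr0, wt0 ++ [pvSpan target s], pt0 ++ [pvSpan target s]) := by
            simp only [pvBStep, hspan]
            rw [if_pos hmark, if_neg (show ¬ pvHasGt prev = true by rw [hprev2]; exact hgt), if_neg hne]
          rw [hstep, hlo']
          obtain ⟨lo', prev', hrec⟩ := ih (s+1) _ tok wr0 pr0 (wt0 ++ [pvSpan target s]) (pt0 ++ [pvSpan target s]) hdrop' rfl hprev'
          refine ⟨lo', prev', ?_⟩
          rw [hrec]
          have hW1 : pvW target "[/]" (tok :: xs) s = pvW target "[/]" xs (s+1) := by
            rw [pvW, if_neg (by simp [hne]), List.nil_append]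
          have hP1 : pvP target "[/]" (tok :: xs) s = pvP target "[/]" xs (s+1) := by
            rw [pvP, if_neg (by simp [hne]), List.nil_append]
          have hW2 : pvW target "[//]" (tok :: xs) s = [pvSpan target s] ++ pvW target "[//]" xs (s+1) := by
            rw [pvW, if_pos ⟨htk, h2, hgt⟩, hspan]
          have hP2 : pvP target "[//]" (tok :: xs) s = [pvSpan target s] ++ pvP target "[//]" xs (s+1) := by
            rw [pvP, if_pos ⟨htk, h2⟩]
          rw [hW1, hP1, hW2, hP2]
          simp [List.append_assoc]
    · have hstep : pvBStep (lo, prev, wr0, pr0, wt0, pt0) (((s : Nat) : Int), tok)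
          = ((if 1 ≤ (s : Int) ∧ pvHasLt tok = true then (s : Int) else lo), tok,
              wr0, pr0, wt0, pt0) := by
        simp only [pvBStep]
        rw [if_neg hmark]
      rw [hstep, hlo']
      obtain ⟨lo', prev', hrec⟩ := ih (s+1) _ tok wr0 pr0 wt0 pt0 hdrop' rfl hprev'
      refine ⟨lo', prev', ?_⟩
      rw [hrec]
      have hng : ∀ c : String, (c = "[/]" ∨ c = "[//]") → ¬ (tok = c ∧ 2 ≤ s) := by
        rintro c hc ⟨rfl, hs2⟩
        exact hmark ⟨by exact_mod_cast hs2, hc⟩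
      have hW1 : pvW target "[/]" (tok :: xs) s = pvW target "[/]" xs (s+1) := by
        rw [pvW, if_neg (fun h => hng "[/]" (Or.inl rfl) ⟨h.1, h.2.1⟩), List.nil_append]
      have hP1 : pvP target "[/]" (tok :: xs) s = pvP target "[/]" xs (s+1) := by
        rw [pvP, if_neg (hng "[/]" (Or.inl rfl)), List.nil_append]
      have hW2 : pvW target "[//]" (tok :: xs) s = pvW target "[//]" xs (s+1) := by
        rw [pvW, if_neg (fun h => hng "[//]" (Or.inr rfl) ⟨h.1, h.2.1⟩), List.nil_append]
      have hP2 : pvP target "[//]" (tok :: xs) s = pvP target "[//]" xs (s+1) := by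
        rw [pvP, if_neg (hng "[//]" (Or.inr rfl)), List.nil_append]
      rw [hW1, hP1, hW2, hP2]

theorem pvEmpty (target : List String) (c : String) :
    ∀ (xs : List String) (s : Nat), (∀ t ∈ xs, t ≠ c) →
      pvW target c xs s = [] ∧ pvP target c xs s = [] := by
  intro xs
  induction xs with
  | nil => intro s _; exact ⟨rfl, rfl⟩
  | cons tok xs ih =>
    intro s hne
    have h1 : tok ≠ c := hne tok (by simp)
    have ⟨hw, hp⟩ := ih (s+1) (fun t ht => hne t (by simp [ht]))
    constructor
    · rw [pvW, if_neg (fun h => h1 h.1), List.nil_append, hw]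
    · rw [pvP, if_neg (fun h => h1 h.1), List.nil_append, hp]

theorem get_all_errors_eq (target : List String) :
    get_all_errors target = get_all_errors_alt target := by
  have hA1 := pvA_fold target "[/]" target 0 [] [] rfl
  have hA2 := pvA_fold target "[//]" target 0 [] [] rfl
  obtain ⟨lo', prev', hB⟩ := pvB_fold target target 0 1 "" [] [] [] [] rfl
    (by simp [pvG]) (fun h => absurd h (by omega))
  simp only [Nat.cast_zero, List.nil_append] at hA1 hA2 hB
  have hBres : get_all_errors_alt target =
      (if pvW target "[/]" target 0 = [] ∧ pvP target "[/]" target 0 = []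
          ∧ pvW target "[//]" target 0 = [] ∧ pvP target "[//]" target 0 = [] then none
       else some (pvW target "[/]" target 0, pvP target "[/]" target 0,
                  pvW target "[//]" target 0, pvP target "[//]" target 0)) := by
    rw [get_all_errors_alt, hB]
  rw [hBres, get_all_errors]
  by_cases hm : "[//]" ∉ target ∧ "[/]" ∉ target
  · rw [if_pos hm]
    have ⟨hw1, hp1⟩ := pvEmpty target "[/]" target 0 (fun t ht => by rintro rfl; exact hm.2 ht)
    have ⟨hw2, hp2⟩ := pvEmpty target "[//]" target 0 (fun t ht => by rintro rfl; exact hm.1 ht)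
    rw [if_pos ⟨hw1, hp1, hw2, hp2⟩]
  · rw [if_neg hm]
    simp only [hA1, hA2]

-- ===== VERDICT (by name: the statement is the Claim_ definition above) =====
theorem get_all_errors_spec : Claim_equal_get_all_errors := by
  intro target _
  unfold Spec_get_all_errors
  exact get_all_errors_eq target
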